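-- pv_equiv track=rewrite | github.com/ChopinNo3Op9/Coding-Challenge | side length pile up.py | pileup
-- ===== SOURCE A (Python) =====
-- def pileup(b):
--     current = max(b[0], b[-1])
--     while b[0] <= current or b[-1] <= current:
--         if b[0] > current:
--             current = b[-1]
--             b.pop(-1)
--         elif b[-1] > current:
--             current = b[0]
--             b.pop(0)
--         elif b[0] <= b[-1]:
--             current = b[-1]
--             b.pop(-1)
--         else:
--             current = b[0]
--             b.pop(0)
--
--
--         if len(b) == 0:
--             return "Yes"
--     return "No"
-- ===== SOURCE B (Python) =====
-- def pileup(b):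
--     # Two pointers moving inward instead of quadratic list.pop(0)/pop(-1);
--     # unlike A, does not mutate the caller's list (return-value equivalence only).
--     i, k = 0, len(b)
--     cur = max(b[0], b[-1])
--     while b[i] <= cur or b[k - 1] <= cur:
--         if b[i] > cur:
--             k -= 1
--             cur = b[k]
--         elif b[k - 1] > cur:
--             cur = b[i]
--             i += 1
--         elif b[i] <= b[k - 1]:
--             k -= 1
--             cur = b[k]
--         else:
--             cur = b[i]
--             i += 1
--         if i == k:
--             return "Yes"
--     return "No"
-- ===== Notes on version B (the rewrite author's own statement) =====
-- stated objective: faster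
-- what changed: Replaces the destructive list.pop(0)/pop(-1) loop by two index pointers moving inward over the untouched list, making each step O(1) instead of O(n); B does not mutate the argument (return value is what is proved equal).
-- outside the precondition, e.g. on pileup([]): A raises IndexError, B raises IndexError
import Mathlib
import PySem

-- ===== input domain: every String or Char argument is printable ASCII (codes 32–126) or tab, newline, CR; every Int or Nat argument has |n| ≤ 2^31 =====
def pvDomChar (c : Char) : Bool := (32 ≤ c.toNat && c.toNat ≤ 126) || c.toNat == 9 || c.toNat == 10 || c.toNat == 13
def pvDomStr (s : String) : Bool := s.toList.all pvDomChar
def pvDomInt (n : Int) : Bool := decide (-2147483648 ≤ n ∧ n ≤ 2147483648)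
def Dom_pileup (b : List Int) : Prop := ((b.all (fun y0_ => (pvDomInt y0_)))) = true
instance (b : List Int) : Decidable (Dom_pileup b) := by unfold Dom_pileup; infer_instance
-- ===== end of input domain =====

-- ===== PORT A =====
-- A's while loop: each iteration pops exactly one element, so fuel = length suffices.
-- Inside the loop the list is never empty (Pre_ excludes []), so b[0]/b[-1] are
-- headD/getLastD here (the default is never used on admitted executions).
def pileupLoop : Nat → List Int → Int → String
  | 0, _, _ => "No"
  | f + 1, b, cur =>
    let h := b.headD 0           -- b[0]
    let t := b.getLastD 0        -- b[-1]
    if h ≤ cur ∨ t ≤ cur then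
      let s : Int × List Int :=
        if h > cur then (t, b.dropLast)
        else if t > cur then (h, b.tail)
        else if h ≤ t then (t, b.dropLast)
        else (h, b.tail)
      if s.2.length = 0 then "Yes" else pileupLoop f s.2 s.1
    else "No"

def pileup (b : List Int) : String :=
  pileupLoop b.length b (max (b.headD 0) (b.getLastD 0))

-- ===== PORT B =====
-- B keeps the list intact and moves two cursors i (inclusive) and k (exclusive)
-- inward; the Python ints i, k stay in [0, len b] on every admitted execution,
-- so they are Nat here; getD's default is never used on admitted executions.
def pileupAltLoop (b : List Int) : Nat → Nat → Nat → Int → String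
  | 0, _, _, _ => "No"
  | f + 1, i, k, cur =>
    let x := b.getD i 0             -- b[i]
    let y := b.getD (k - 1) 0       -- b[k-1]
    if x ≤ cur ∨ y ≤ cur then
      let s : Nat × Nat × Int :=
        if x > cur then (i, k - 1, y)
        else if y > cur then (i + 1, k, x)
        else if x ≤ y then (i, k - 1, y)
        else (i + 1, k, x)
      if s.1 = s.2.1 then "Yes" else pileupAltLoop b f s.1 s.2.1 s.2.2
    else "No"

def pileup_alt (b : List Int) : String :=
  pileupAltLoop b b.length 0 b.length (max (b.getD 0 0) (b.getD (b.length - 1) 0))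

-- ===== PRECONDITION & SPEC =====
-- On [] the Python A raises IndexError (b[0]); so does B; excluded.
def Pre_pileup (b : List Int) : Prop := b ≠ []
instance (b : List Int) : Decidable (Pre_pileup b) := by unfold Pre_pileup; infer_instance
def pvWitness_pileup : List Int := [3, 1, 2]
def Spec_pileup (b : List Int) (out : String) : Prop := out = pileup_alt b
instance (b : List Int) (out : String) : Decidable (Spec_pileup b out) := by unfold Spec_pileup; infer_instance

-- ===== CLAIM (what is proved, stated in full; the proofs are below) =====
def Claim_equal_pileup : Prop := ∀ (b : List Int), Dom_pileup b → Pre_pileup b → Spec_pileup b (pileup b)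

-- ===== LEMMAS AND PROOFS =====

-- the sublist b[i:k]
def pvSub (b : List Int) (i k : Nat) : List Int := (b.drop i).take (k - i)

lemma pvSub_length (b : List Int) (i k : Nat) (hk : k ≤ b.length) :
    (pvSub b i k).length = k - i := by
  simp [pvSub]; omega

lemma pvSub_headD (b : List Int) (i k : Nat) (hik : i < k) :
    (pvSub b i k).headD 0 = b.getD i 0 := by
  have h1 : (pvSub b i k).headD 0 = (pvSub b i k).getD 0 0 := by
    cases pvSub b i k <;> simp
  rw [h1]
  simp only [pvSub, List.getD_eq_getElem?_getD, List.getElem?_take, List.getElem?_drop]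
  rw [if_pos (by omega)]
  norm_num

lemma pvSub_getLastD (b : List Int) (i k : Nat) (hik : i < k) (hk : k ≤ b.length) :
    (pvSub b i k).getLastD 0 = b.getD (k - 1) 0 := by
  have hlen := pvSub_length b i k hk
  have h1 : (pvSub b i k).getLastD 0 = (pvSub b i k).getD ((pvSub b i k).length - 1) 0 := by
    cases h : pvSub b i k with
    | nil => simp
    | cons a l => rw [List.getLastD_eq_getLast?, List.getLast?_eq_getElem?,
        List.getD_eq_getElem?_getD]
  rw [h1, hlen]
  simp only [pvSub, List.getD_eq_getElem?_getD, List.getElem?_take, List.getElem?_drop]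
  rw [if_pos (by omega)]
  have he : i + (k - i - 1) = k - 1 := by omega
  rw [he]

lemma pvSub_tail (b : List Int) (i k : Nat) :
    (pvSub b i k).tail = pvSub b (i + 1) k := by
  simp [pvSub, ← List.drop_one, List.drop_take, List.drop_drop]
  omega

lemma pvSub_dropLast (b : List Int) (i k : Nat) (hk : k ≤ b.length) :
    (pvSub b i k).dropLast = pvSub b i (k - 1) := by
  rw [List.dropLast_eq_take, pvSub_length b i k hk]
  simp [pvSub, List.take_take]
  congr 1
  omega

lemma pv_loop_eq (b : List Int) (f : Nat) :
    ∀ i k cur, i < k → k ≤ b.length →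
      pileupLoop f (pvSub b i k) cur = pileupAltLoop b f i k cur := by
  induction f with
  | zero => intro i k cur _ _; rfl
  | succ f ih =>
    intro i k cur hik hk
    rw [pileupLoop, pileupAltLoop]
    rw [pvSub_headD b i k hik, pvSub_getLastD b i k hik hk]
    set x := b.getD i 0
    set y := b.getD (k - 1) 0
    by_cases hcond : x ≤ cur ∨ y ≤ cur
    · rw [if_pos hcond, if_pos hcond]
      -- the four branches pair up: drop-last ↔ (i, k-1), drop-first ↔ (i+1, k)
      have back : (if (pvSub b i k).dropLast.length = 0 then "Yes"
            else pileupLoop f (pvSub b i k).dropLast y) = (if i = k - 1 then "Yes"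
            else pileupAltLoop b f i (k - 1) y) := by
        rw [pvSub_dropLast b i k hk, pvSub_length b i (k - 1) (by omega)]
        by_cases he : i = k - 1
        · rw [if_pos (by omega), if_pos he]
        · rw [if_neg (by omega), if_neg he, ih i (k - 1) y (by omega) (by omega)]
      have front : (if (pvSub b i k).tail.length = 0 then "Yes"
            else pileupLoop f (pvSub b i k).tail x) = (if i + 1 = k then "Yes"
            else pileupAltLoop b f (i + 1) k x) := by
        rw [pvSub_tail b i k]
        by_cases he : i + 1 = k
        · rw [if_pos (by rw [pvSub_length b (i+1) k hk]; omega), if_pos he]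
        · rw [if_neg (by rw [pvSub_length b (i+1) k hk]; omega), if_neg he,
            ih (i + 1) k x (by omega) hk]
      by_cases h1 : x > cur
      · simpa [h1] using back
      · by_cases h2 : y > cur
        · simpa [h1, h2] using front
        · by_cases h3 : x ≤ y
          · simpa [h1, h2, h3] using back
          · simpa [h1, h2, h3] using front
    · rw [if_neg hcond, if_neg hcond]

-- ===== VERDICT (by name: the statement is the Claim_ definition above) =====
theorem pileup_spec : Claim_equal_pileup := by
  intro b _ hb
  unfold Spec_pileup pileup pileup_alt
  have hb' : 0 < b.length := List.length_pos_iff.mpr hb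
  have hsub : pvSub b 0 b.length = b := by simp [pvSub]
  have hhead : b.headD 0 = b.getD 0 0 := by
    have := pvSub_headD b 0 b.length hb'
    rwa [hsub] at this
  have hlast : b.getLastD 0 = b.getD (b.length - 1) 0 := by
    have := pvSub_getLastD b 0 b.length hb' (le_refl _)
    rwa [hsub] at this
  rw [hhead, hlast]
  have h := pv_loop_eq b b.length 0 b.length
    (max (b.getD 0 0) (b.getD (b.length - 1) 0)) hb' (le_refl _)
  rw [hsub] at h
  exact h
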